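-- pv_equiv track=rewrite | github.com/sakshat-patil/272-Project | backend/app/services/dependency_analyzer.py | find_downstream_impact
-- ===== SOURCE A (Python) =====
-- from typing import List, Dict, Set, Tuple
--
-- def find_downstream_impact(
--     affected_supplier_ids: Set[int],
--     dependency_graph: Dict[int, List[int]]
-- ) -> Set[int]:
--     """
--     Find all suppliers that will be affected downstream
--     (suppliers that depend on the affected suppliers)
--     """
--     downstream_affected = set()
--
--     # Invert the graph to find who depends on whom
--     reverse_graph = {}
--     for supplier_id, dependencies in dependency_graph.items():
--         for dep_id in dependencies:
--             if dep_id not in reverse_graph: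
--                 reverse_graph[dep_id] = []
--             reverse_graph[dep_id].append(supplier_id)
--
--     # BFS to find all downstream affected suppliers
--     queue = list(affected_supplier_ids)
--     visited = set(affected_supplier_ids)
--
--     while queue:
--         current = queue.pop(0)
--         dependents = reverse_graph.get(current, [])
--
--         for dependent in dependents:
--             if dependent not in visited:
--                 visited.add(dependent)
--                 downstream_affected.add(dependent)
--                 queue.append(dependent)
--
--     return downstream_affected
-- ===== SOURCE B (Python) =====
-- def find_downstream_impact(affected_supplier_ids, dependency_graph):
--     """
--     Find all suppliers affected downstream: level-synchronous frontier
--     expansion over the original graph (no reverse index, no queue) --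
--     each round scans the edge list once per frontier node to collect
--     the next frontier of newly affected dependents.
--     """
--     visited = set(affected_supplier_ids)
--     downstream_affected = set()
--     frontier = list(affected_supplier_ids)
--     while frontier:
--         next_frontier = []
--         for current in frontier:
--             for supplier_id, dependencies in dependency_graph.items():
--                 if current in dependencies and supplier_id not in visited:
--                     visited.add(supplier_id)
--                     downstream_affected.add(supplier_id)
--                     next_frontier.append(supplier_id)
--         frontier = next_frontier
--     return downstream_affected
-- ===== Notes on version B (the rewrite author's own statement) =====
-- stated objective: alternative
-- what changed: B drops A's reverse-graph construction and FIFO queue entirely and instead expands the affected set level by level, scanning the original edge list per frontier node to collect each next frontier.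
import Mathlib
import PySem

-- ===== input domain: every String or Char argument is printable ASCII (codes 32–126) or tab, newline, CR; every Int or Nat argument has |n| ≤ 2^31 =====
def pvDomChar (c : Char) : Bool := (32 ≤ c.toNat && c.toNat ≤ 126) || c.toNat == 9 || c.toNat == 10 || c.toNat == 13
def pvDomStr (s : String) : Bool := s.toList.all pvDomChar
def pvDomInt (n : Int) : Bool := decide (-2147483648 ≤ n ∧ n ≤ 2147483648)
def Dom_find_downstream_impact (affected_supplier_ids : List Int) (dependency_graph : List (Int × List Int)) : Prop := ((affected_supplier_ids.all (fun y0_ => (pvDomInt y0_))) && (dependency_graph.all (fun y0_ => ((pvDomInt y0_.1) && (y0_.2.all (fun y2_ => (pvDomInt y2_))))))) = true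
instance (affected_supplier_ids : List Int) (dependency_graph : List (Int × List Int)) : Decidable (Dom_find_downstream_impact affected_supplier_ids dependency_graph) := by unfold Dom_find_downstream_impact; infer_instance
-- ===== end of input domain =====

-- B replaces A's reverse-graph + FIFO-queue BFS by level-synchronous frontier expansion over the
-- original edge list (no dict, no queue); return-value equivalence only — neither version mutates
-- its arguments observably.

-- ===== PORT A =====
-- loop state: (queue, visited, downstream_affected)
-- body of "for dependent in dependents: if dependent not in visited: …"
def bfsStepA (st : List Int × List Int × List Int) (dep : Int) : List Int × List Int × List Int :=
  if PySem.Set.contains st.2.1 dep then st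
  else (st.1 ++ [dep], PySem.Set.add st.2.1 dep, PySem.Set.add st.2.2 dep)

-- "if dep_id not in reverse_graph: reverse_graph[dep_id] = []; reverse_graph[dep_id].append(supplier_id)"
-- is exactly reverse_graph[dep_id] = reverse_graph.get(dep_id, []) + [supplier_id], i.e. Dict.modify.
def buildRev (dependency_graph : List (Int × List Int)) : PySem.Dict Int (List Int) :=
  dependency_graph.foldl
    (fun rg p => p.2.foldl (fun rg d => rg.modify d [] (fun l => l ++ [p.1])) rg)
    PySem.Dict.empty

-- "while queue: current = queue.pop(0); …"; the fuel argument only makes the loop total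
-- (one unit per pop; a.length + g.length pops provably suffice, and [] returns regardless of fuel)
def bfsA (rev : PySem.Dict Int (List Int)) : Nat → List Int → List Int → List Int → List Int
  | _, [], _, out => out
  | 0, _ :: _, _, out => out
  | fuel + 1, cur :: rest, visited, out =>
      let st := (rev.getD cur []).foldl bfsStepA (rest, visited, out)
      bfsA rev fuel st.1 st.2.1 st.2.2

def find_downstream_impact (affected_supplier_ids : List Int) (dependency_graph : List (Int × List Int)) : List Int :=
  bfsA (buildRev dependency_graph)
    (affected_supplier_ids.length + dependency_graph.length)
    affected_supplier_ids
    (PySem.Set.ofList affected_supplier_ids)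
    PySem.Set.empty

-- ===== PORT B =====
-- state: (visited, downstream_affected, next_frontier);
-- "for supplier_id, dependencies in dependency_graph.items(): if current in dependencies and supplier_id not in visited: …"
def scanDeps (cur : Int) (st : List Int × List Int × List Int) (p : Int × List Int) : List Int × List Int × List Int :=
  if p.2.contains cur && !(PySem.Set.contains st.1 p.1) then
    (PySem.Set.add st.1 p.1, PySem.Set.add st.2.1 p.1, st.2.2 ++ [p.1])
  else st

-- "while frontier: next_frontier = []; for current in frontier: …; frontier = next_frontier";
-- the fuel only makes the level loop total (one unit per level; g.length + 1 levels provably suffice,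
-- and an empty frontier returns regardless of fuel)
def bfsLevels (g : List (Int × List Int)) : Nat → List Int → List Int × List Int → List Int
  | _, [], vo => vo.2
  | 0, _ :: _, vo => vo.2
  | fuel + 1, cur :: rest, vo =>
      let st := (cur :: rest).foldl (fun st c => g.foldl (scanDeps c) st) (vo.1, vo.2, [])
      bfsLevels g fuel st.2.2 (st.1, st.2.1)

def find_downstream_impact_alt (affected_supplier_ids : List Int) (dependency_graph : List (Int × List Int)) : List Int :=
  bfsLevels dependency_graph (dependency_graph.length + 1) affected_supplier_ids
    (PySem.Set.ofList affected_supplier_ids, PySem.Set.empty)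

-- ===== PRECONDITION & SPEC =====
def Spec_find_downstream_impact (affected_supplier_ids : List Int) (dependency_graph : List (Int × List Int)) (out : List Int) : Prop := out = find_downstream_impact_alt affected_supplier_ids dependency_graph
instance (affected_supplier_ids : List Int) (dependency_graph : List (Int × List Int)) (out : List Int) : Decidable (Spec_find_downstream_impact affected_supplier_ids dependency_graph out) := by unfold Spec_find_downstream_impact; infer_instance

-- ===== CLAIM (what is proved, stated in full; the proofs are below) =====
def Claim_equal_find_downstream_impact : Prop := ∀ (affected_supplier_ids : List Int) (dependency_graph : List (Int × List Int)), Dom_find_downstream_impact affected_supplier_ids dependency_graph → Spec_find_downstream_impact affected_supplier_ids dependency_graph (find_downstream_impact affected_supplier_ids dependency_graph)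

-- ===== LEMMAS AND PROOFS =====

-- ghost intermediate (proof-only): A's inner pass over rev[cur], rephrased as one scan of the edge
-- list with queue-shaped state (queue, visited, out)
def bfsStepB (cur : Int) (st : List Int × List Int × List Int) (p : Int × List Int) : List Int × List Int × List Int :=
  if p.2.contains cur && !(PySem.Set.contains st.2.1 p.1) then
    (st.1 ++ [p.1], PySem.Set.add st.2.1 p.1, PySem.Set.add st.2.2 p.1)
  else st

-- proof-only name for B's one-level fold
def levelF (g : List (Int × List Int)) (f : List Int) (st : List Int × List Int × List Int) : List Int × List Int × List Int :=
  f.foldl (fun st c => g.foldl (scanDeps c) st) st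

-- number of distinct graph keys not yet visited (bounds the remaining work)
def U (g : List (Int × List Int)) (v : List Int) : Nat :=
  ((g.map Prod.fst).toFinset \ v.toFinset).card

-- the inner append loop of A's graph inversion, characterised pointwise
theorem getD_revInner (deps : List Int) (s c : Int) (rg : PySem.Dict Int (List Int)) :
    (deps.foldl (fun rg d => rg.modify d [] (fun l => l ++ [s])) rg).getD c []
      = rg.getD c [] ++ List.replicate (deps.count c) s := by
  induction deps generalizing rg with
  | nil => simp
  | cons d t ih =>
    rw [List.foldl_cons, ih, PySem.Dict.getD_modify, List.count_cons]
    by_cases h : c = d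
    · subst h
      simp [List.replicate_succ]
    · have h' : (d == c) = false := by simpa using fun e => h e.symm
      simp [h, h']

-- reverse_graph.get(c, []) lists exactly the suppliers naming c, in graph order, with multiplicity
theorem getD_buildRev (g : List (Int × List Int)) (c : Int) :
    (buildRev g).getD c [] = g.flatMap (fun p => List.replicate (p.2.count c) p.1) := by
  suffices h : ∀ rg : PySem.Dict Int (List Int),
      (g.foldl (fun rg p => p.2.foldl (fun rg d => rg.modify d [] (fun l => l ++ [p.1])) rg) rg).getD c []
        = rg.getD c [] ++ g.flatMap (fun p => List.replicate (p.2.count c) p.1) by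
    simpa [buildRev] using h PySem.Dict.empty
  induction g with
  | nil => simp
  | cons p t ih =>
    intro rg
    rw [List.foldl_cons, ih, getD_revInner]
    simp

theorem contains_add_self (v : List Int) (x : Int) :
    PySem.Set.contains (PySem.Set.add v x) x = true := by
  simp [PySem.Set.add, PySem.Set.contains]
  by_cases h : x ∈ v <;> simp [h]

-- processing copies of an already-visited node is a no-op
theorem foldl_stepA_replicate_visited (n : Nat) (x : Int) (st : List Int × List Int × List Int)
    (h : PySem.Set.contains st.2.1 x = true) :
    (List.replicate n x).foldl bfsStepA st = st := by
  induction n with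
  | zero => rfl
  | succ n ih => rw [List.replicate_succ, List.foldl_cons, bfsStepA, if_pos h]; exact ih

-- one graph pair, both ways
theorem stepAB (cur : Int) (p : Int × List Int) (st : List Int × List Int × List Int) :
    (List.replicate (p.2.count cur) p.1).foldl bfsStepA st = bfsStepB cur st p := by
  rcases hn : p.2.count cur with _ | n
  · have hm : cur ∉ p.2 := List.count_eq_zero.mp hn
    simp [bfsStepB, hm]
  · have hm : cur ∈ p.2 := List.count_pos_iff.mp (by omega : 0 < p.2.count cur)
    by_cases hv : p.1 ∈ st.2.1
    · have hv' : PySem.Set.contains st.2.1 p.1 = true := by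
        simp [PySem.Set.contains, hv]
      rw [foldl_stepA_replicate_visited _ _ _ hv']
      simp [bfsStepB, hm, hv]
    · rw [List.replicate_succ, List.foldl_cons, bfsStepA, if_neg (by simpa [PySem.Set.contains] using hv)]
      rw [foldl_stepA_replicate_visited _ _ _ (contains_add_self _ _)]
      simp [bfsStepB, hm, hv]

-- A's pass over reverse_graph[cur] = one queue-shaped pass over the whole edge list
theorem foldl_flat_eq (cur : Int) (g : List (Int × List Int)) (st : List Int × List Int × List Int) :
    (g.flatMap (fun p => List.replicate (p.2.count cur) p.1)).foldl bfsStepA st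
      = g.foldl (bfsStepB cur) st := by
  induction g generalizing st with
  | nil => rfl
  | cons p t ih =>
    rw [List.flatMap_cons, List.foldl_append, stepAB, List.foldl_cons]
    exact ih _

-- queue-shaped pass = B's (visited, out, next)-shaped pass, with the queue prefix carried outside
theorem stepBridge (cur : Int) (g : List (Int × List Int)) :
    ∀ (q n v o : List Int),
      g.foldl (bfsStepB cur) (q ++ n, v, o)
        = (q ++ (g.foldl (scanDeps cur) (v, o, n)).2.2,
           (g.foldl (scanDeps cur) (v, o, n)).1,
           (g.foldl (scanDeps cur) (v, o, n)).2.1) := by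
  induction g with
  | nil => intro q n v o; rfl
  | cons p t ih =>
    intro q n v o
    rw [List.foldl_cons, List.foldl_cons]
    by_cases h : (p.2.contains cur && !(PySem.Set.contains v p.1)) = true
    · rw [bfsStepB, if_pos h, scanDeps, if_pos h]
      rw [List.append_assoc]
      exact ih q (n ++ [p.1]) _ _
    · rw [bfsStepB, if_neg h, scanDeps, if_neg h]
      exact ih q n v o

-- one edge-list scan only appends fresh graph keys, to visited, out and next alike
theorem scan_char (cur : Int) (g : List (Int × List Int)) :
    ∀ (v o n : List Int), (∀ x ∈ o, x ∈ v) →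
      ∃ d : List Int,
        g.foldl (scanDeps cur) (v, o, n) = (v ++ d, o ++ d, n ++ d) ∧
        d.Nodup ∧ ∀ x ∈ d, x ∉ v ∧ x ∈ g.map Prod.fst := by
  induction g with
  | nil => intro v o n _; exact ⟨[], by simp, by simp, by simp⟩
  | cons p t ih =>
    intro v o n hsub
    rw [List.foldl_cons]
    by_cases h : (p.2.contains cur && !(PySem.Set.contains v p.1)) = true
    · have hv : p.1 ∉ v := by
        rcases Bool.and_eq_true_iff.mp h with ⟨_, h2⟩
        simpa [PySem.Set.contains] using h2
      have ho : p.1 ∉ o := fun hm => hv (hsub _ hm)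
      have haddv : PySem.Set.add v p.1 = v ++ [p.1] := by
        simp [PySem.Set.add, PySem.Set.contains, hv]
      have haddo : PySem.Set.add o p.1 = o ++ [p.1] := by
        simp [PySem.Set.add, PySem.Set.contains, ho]
      rw [scanDeps, if_pos h]
      have hsub' : ∀ x ∈ o ++ [p.1], x ∈ v ++ [p.1] := by
        intro x hx
        rcases List.mem_append.mp hx with hx | hx
        · exact List.mem_append.mpr (Or.inl (hsub _ hx))
        · exact List.mem_append.mpr (Or.inr hx)
      obtain ⟨d', hd'eq, hd'nd, hd'p⟩ := ih (v ++ [p.1]) (o ++ [p.1]) (n ++ [p.1]) hsub'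
      refine ⟨p.1 :: d', ?_, ?_, ?_⟩
      · simp only [haddv, haddo]
        rw [hd'eq]
        simp
      · refine List.nodup_cons.mpr ⟨fun hm => ?_, hd'nd⟩
        exact (hd'p _ hm).1 (List.mem_append.mpr (Or.inr (by simp)))
      · intro x hx
        rcases List.mem_cons.mp hx with hx | hx
        · subst hx; exact ⟨hv, by simp⟩
        · rcases hd'p _ hx with ⟨h1, h2⟩
          exact ⟨fun hm => h1 (List.mem_append.mpr (Or.inl hm)), by simp [h2]⟩
    · rw [scanDeps, if_neg h]
      obtain ⟨d, hdeq, hdnd, hdp⟩ := ih v o n hsub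
      exact ⟨d, hdeq, hdnd, fun x hx => ⟨(hdp x hx).1, by simp [(hdp x hx).2]⟩⟩

-- a whole level does the same
theorem level_char (g : List (Int × List Int)) :
    ∀ (f v o n : List Int), (∀ x ∈ o, x ∈ v) →
      ∃ d : List Int,
        levelF g f (v, o, n) = (v ++ d, o ++ d, n ++ d) ∧
        d.Nodup ∧ ∀ x ∈ d, x ∉ v ∧ x ∈ g.map Prod.fst := by
  intro f
  induction f with
  | nil => intro v o n _; exact ⟨[], by simp [levelF], by simp, by simp⟩
  | cons c t ih =>
    intro v o n hsub
    obtain ⟨d1, h1eq, h1nd, h1p⟩ := scan_char c g v o n hsub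
    have hsub' : ∀ x ∈ o ++ d1, x ∈ v ++ d1 := by
      intro x hx
      rcases List.mem_append.mp hx with hx | hx
      · exact List.mem_append.mpr (Or.inl (hsub _ hx))
      · exact List.mem_append.mpr (Or.inr hx)
    obtain ⟨d2, h2eq, h2nd, h2p⟩ := ih (v ++ d1) (o ++ d1) (n ++ d1) hsub'
    refine ⟨d1 ++ d2, ?_, ?_, ?_⟩
    · have : levelF g (c :: t) (v, o, n) = levelF g t (g.foldl (scanDeps c) (v, o, n)) := by
        simp [levelF]
      rw [this, h1eq, h2eq]
      simp
    · refine List.Nodup.append h1nd h2nd ?_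
      intro x hx1 hx2
      exact (h2p _ hx2).1 (List.mem_append.mpr (Or.inr hx1))
    · intro x hx
      rcases List.mem_append.mp hx with hx | hx
      · exact h1p _ hx
      · rcases h2p _ hx with ⟨hh1, hh2⟩
        exact ⟨fun hm => hh1 (List.mem_append.mpr (Or.inl hm)), hh2⟩

theorem bfsA_nil (rev : PySem.Dict Int (List Int)) (fuel : Nat) (v o : List Int) :
    bfsA rev fuel [] v o = o := by cases fuel <;> rfl

theorem bfsLevels_nil (g : List (Int × List Int)) (fuel : Nat) (vo : List Int × List Int) :
    bfsLevels g fuel [] vo = vo.2 := by cases fuel <;> rfl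

-- fast-forward A through one whole frontier level
theorem bfsA_level (g : List (Int × List Int)) :
    ∀ (f D n v o : List Int) (fA : Nat),
      bfsA (buildRev g) (f.length + fA) (f ++ D ++ n) v o
        = bfsA (buildRev g) fA (D ++ (levelF g f (v, o, n)).2.2)
            (levelF g f (v, o, n)).1 (levelF g f (v, o, n)).2.1 := by
  intro f
  induction f with
  | nil => intro D n v o fA; simp [levelF]
  | cons cur t ih =>
    intro D n v o fA
    have hlen : (cur :: t).length + fA = (t.length + fA) + 1 := by
      simp [Nat.add_right_comm]
    rw [hlen]
    show bfsA (buildRev g) (t.length + fA)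
        (((buildRev g).getD cur []).foldl bfsStepA (t ++ D ++ n, v, o)).1
        (((buildRev g).getD cur []).foldl bfsStepA (t ++ D ++ n, v, o)).2.1
        (((buildRev g).getD cur []).foldl bfsStepA (t ++ D ++ n, v, o)).2.2 = _
    rw [getD_buildRev, foldl_flat_eq, stepBridge cur g (t ++ D) n v o]
    dsimp only
    rw [ih]
    simp only [Prod.mk.eta]
    rw [show levelF g (cur :: t) (v, o, n) = levelF g t (g.foldl (scanDeps cur) (v, o, n)) from by
      simp [levelF]]

-- freshly visiting d distinct unvisited keys shrinks U by exactly d.length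
theorem U_step (g : List (Int × List Int)) (v d : List Int) (hd : d.Nodup)
    (h : ∀ x ∈ d, x ∉ v ∧ x ∈ g.map Prod.fst) :
    U g (v ++ d) + d.length = U g v := by
  have hsub : d.toFinset ⊆ (g.map Prod.fst).toFinset \ v.toFinset := by
    intro x hx
    rcases h x (List.mem_toFinset.mp hx) with ⟨h1, h2⟩
    simp [Finset.mem_sdiff, List.mem_toFinset, h1, h2]
  have hcard : d.toFinset.card = d.length := List.toFinset_card_of_nodup hd
  have hle : d.toFinset.card ≤ ((g.map Prod.fst).toFinset \ v.toFinset).card :=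
    Finset.card_le_card hsub
  have : U g (v ++ d) = U g v - d.length := by
    unfold U
    rw [List.toFinset_append, ← Finset.sup_eq_union, ← sdiff_sdiff]
    rw [Finset.card_sdiff, Finset.inter_eq_left.mpr hsub, hcard]
  unfold U at *
  omega

theorem U_le_len (g : List (Int × List Int)) (v : List Int) : U g v ≤ g.length := by
  calc U g v ≤ (g.map Prod.fst).toFinset.card := Finset.card_le_card (Finset.sdiff_subset)
    _ ≤ (g.map Prod.fst).length := List.toFinset_card_le _
    _ = g.length := List.length_map Prod.fst

-- the two traversals agree whenever both fuels are sufficient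
theorem main_eq (g : List (Int × List Int)) :
    ∀ (fB : Nat) (f v o : List Int) (fA : Nat),
      (∀ x ∈ o, x ∈ v) → f.length + U g v ≤ fA → U g v + 1 ≤ fB →
      bfsA (buildRev g) fA f v o = bfsLevels g fB f (v, o) := by
  intro fB
  induction fB with
  | zero => intro f v o fA _ _ hB; omega
  | succ fB ih =>
    intro f v o fA hsub hA hB
    cases f with
    | nil => rw [bfsA_nil]; rfl
    | cons cur rest =>
      obtain ⟨d, hdeq, hdnd, hdp⟩ := level_char g (cur :: rest) v o [] hsub
      have hfa : fA = (cur :: rest).length + (fA - (cur :: rest).length) := by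
        simp at hA ⊢; omega
      rw [hfa]
      have hAlvl := bfsA_level g (cur :: rest) [] [] v o (fA - (cur :: rest).length)
      simp only [List.append_nil] at hAlvl
      rw [hAlvl, hdeq]
      have hBlvl : bfsLevels g (fB + 1) (cur :: rest) (v, o)
          = bfsLevels g fB ((levelF g (cur :: rest) (v, o, [])).2.2)
              ((levelF g (cur :: rest) (v, o, [])).1, (levelF g (cur :: rest) (v, o, [])).2.1) := by
        rfl
      rw [hBlvl, hdeq]
      simp only [List.nil_append]
      have hU := U_step g v d hdnd hdp
      cases d with
      | nil => rw [bfsA_nil, bfsLevels_nil]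
      | cons x xs =>
        apply ih
        · intro y hy
          rcases List.mem_append.mp hy with hy | hy
          · exact List.mem_append.mpr (Or.inl (hsub _ hy))
          · exact List.mem_append.mpr (Or.inr hy)
        · simp at hA hU ⊢; omega
        · simp at hB hU ⊢; omega

-- ===== VERDICT (by name: the statement is the Claim_ definition above) =====
theorem find_downstream_impact_spec : Claim_equal_find_downstream_impact := by
  intro a g _
  show find_downstream_impact a g = find_downstream_impact_alt a g
  unfold find_downstream_impact find_downstream_impact_alt
  apply main_eq
  · intro x hx; simp [PySem.Set.empty] at hx
  · have := U_le_len g (PySem.Set.ofList a); omega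
  · have := U_le_len g (PySem.Set.ofList a); omega
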